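-- pv_equiv track=rewrite | github.com/OpenNetAI/DSMRC-S | postprocess.py | format_rouge_scores
-- ===== SOURCE A (Python) =====
-- def format_rouge_scores(rouge_result):
--   lines = []
--   line, prev_metric = [], None
--   for key in sorted(rouge_result.keys()):
--     metric = key.rsplit("_", maxsplit=1)[0]
--     if metric != prev_metric and prev_metric is not None:
--       lines.append("\t".join(line))
--       line = []
--     line.append("%s %s" % (key, rouge_result[key]))
--     prev_metric = metric
--   lines.append("\t".join(line))
--   return "\n".join(lines)
-- ===== SOURCE B (Python) =====
-- def format_rouge_scores(rouge_result):
--     def metric(key):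
--         return key.rsplit("_", maxsplit=1)[0]
--     keys = sorted(rouge_result.keys())
--     groups, i, n = [], 0, len(keys)
--     while True:
--         j = i
--         while j < n and metric(keys[j]) == metric(keys[i]):
--             j += 1
--         groups.append(keys[i:j])
--         if j == n:
--             break
--         i = j
--     return "\n".join(
--         "\t".join("%s %s" % (k, rouge_result[k]) for k in g) for g in groups
--     )
-- ===== Notes on version B (the rewrite author's own statement) =====
-- stated objective: alternative
-- what changed: Replaces A's flat fold that detects metric boundaries with a prev_metric sentinel and flushes a partial line by an explicit two-level structure: first split the sorted keys into maximal consecutive runs sharing a metric prefix (a two-pointer run scanner), then render each run into a line.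
import Mathlib
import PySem

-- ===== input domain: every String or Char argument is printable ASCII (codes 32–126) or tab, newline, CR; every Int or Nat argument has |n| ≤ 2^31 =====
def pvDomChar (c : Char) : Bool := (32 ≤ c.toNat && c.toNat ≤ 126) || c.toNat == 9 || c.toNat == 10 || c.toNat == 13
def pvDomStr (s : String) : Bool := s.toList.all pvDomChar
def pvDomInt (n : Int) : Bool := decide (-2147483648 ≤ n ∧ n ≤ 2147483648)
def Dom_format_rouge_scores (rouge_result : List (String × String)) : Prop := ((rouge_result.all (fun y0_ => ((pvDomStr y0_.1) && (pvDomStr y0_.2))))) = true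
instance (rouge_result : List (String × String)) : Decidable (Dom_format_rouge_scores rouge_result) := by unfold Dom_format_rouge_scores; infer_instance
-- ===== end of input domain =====

-- B replaces A's flat fold (prev_metric sentinel, flush-on-boundary) by an explicit two-level
-- structure: split the sorted keys into maximal consecutive runs of equal metric prefix, then
-- render each run into a tab-joined line (alternative decomposition, same cost).

-- ===== PORT A =====
-- shared helper: key.rsplit("_", maxsplit=1)[0], ported by hand via rfind (exact: the part before
-- the last '_'; the whole key when it has no '_')
def metricOf (key : String) : String :=
  let i := PySem.Str.rfind key "_"
  if i = -1 then key else String.ofList (key.toList.take i.toNat)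

-- shared helper: "%s %s" % (key, rouge_result[key]) — the key always comes from the dict, so the
-- default "" of getD is never used (Python's KeyError is unreachable)
def fmtItem (d : PySem.Dict String String) (key : String) : String :=
  PySem.Str.join " " [key, d.getD key ""]

-- one iteration of A's for-loop over the state (lines, line, prev_metric)
def stepA (d : PySem.Dict String String) (s : List String × List String × Option String)
    (key : String) : List String × List String × Option String :=
  let metric := metricOf key
  if some metric ≠ s.2.2 ∧ s.2.2 ≠ none then
    (s.1 ++ [PySem.Str.join "\t" s.2.1], [fmtItem d key], some metric)
  else
    (s.1, s.2.1 ++ [fmtItem d key], some metric)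

def format_rouge_scores (rouge_result : List (String × String)) : String :=
  let d := PySem.Dict.ofList rouge_result
  let s := (PySem.List.sorted d.keys (fun k => k) false).foldl (stepA d) ([], [], none)
  PySem.Str.join "\n" (s.1 ++ [PySem.Str.join "\t" s.2.1])

-- ===== PORT B =====
-- the inner while loop: split off the maximal run of keys whose metric prefix is m
def runSplit (m : String) (ks : List String) : List String × List String :=
  match ks with
  | [] => ([], [])
  | k :: rest =>
    if metricOf k = m then
      let p := runSplit m rest
      (k :: p.1, p.2)
    else ([], k :: rest)

-- needed by groupsB's termination proof
theorem runSplit_snd_le (m : String) (ks : List String) :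
    (runSplit m ks).2.length ≤ ks.length := by
  induction ks with
  | nil => simp [runSplit]
  | cons k rest ih =>
    simp only [runSplit]
    split
    · simpa using Nat.le_succ_of_le ih
    · simp

-- the outer while loop: the list of groups (an empty key list yields the single empty group,
-- exactly as B's loop appends one line before breaking)
def groupsB (keys : List String) : List (List String) :=
  match keys with
  | [] => [[]]
  | k :: rest =>
    let p := runSplit (metricOf k) rest
    if p.2.isEmpty then [k :: p.1]
    else (k :: p.1) :: groupsB p.2
termination_by keys.length
decreasing_by
  have hle := runSplit_snd_le (metricOf k) rest
  simp
  omega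

def format_rouge_scores_alt (rouge_result : List (String × String)) : String :=
  let d := PySem.Dict.ofList rouge_result
  let keys := PySem.List.sorted d.keys (fun k => k) false
  PySem.Str.join "\n" ((groupsB keys).map (fun g => PySem.Str.join "\t" (g.map (fmtItem d))))

-- ===== PRECONDITION & SPEC =====
def Spec_format_rouge_scores (rouge_result : List (String × String)) (out : String) : Prop := out = format_rouge_scores_alt rouge_result
instance (rouge_result : List (String × String)) (out : String) : Decidable (Spec_format_rouge_scores rouge_result out) := by unfold Spec_format_rouge_scores; infer_instance

-- ===== CLAIM (what is proved, stated in full; the proofs are below) =====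
def Claim_equal_format_rouge_scores : Prop := ∀ (rouge_result : List (String × String)), Dom_format_rouge_scores rouge_result → Spec_format_rouge_scores rouge_result (format_rouge_scores rouge_result)

-- ===== LEMMAS AND PROOFS =====

theorem groupsB_nil : groupsB [] = [[]] := by rw [groupsB.eq_def]

theorem groupsB_cons_nil {k : String} {rest run : List String}
    (h : runSplit (metricOf k) rest = (run, [])) : groupsB (k :: rest) = [k :: run] := by
  rw [groupsB.eq_def]
  simp [h]

theorem groupsB_cons_cons {k k2 : String} {rest run tail : List String}
    (h : runSplit (metricOf k) rest = (run, k2 :: tail)) :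
    groupsB (k :: rest) = (k :: run) :: groupsB (k2 :: tail) := by
  rw [groupsB.eq_def]
  simp [h]

-- groupsB keys relative to a pending metric m: the first group is still open when the first
-- key's metric equals m
def segs (m : String) (keys : List String) : List (List String) :=
  match keys with
  | [] => [[]]
  | k :: _ => if metricOf k = m then groupsB keys else [] :: groupsB keys

theorem groupsB_ne_nil (keys : List String) : groupsB keys ≠ [] := by
  cases keys with
  | nil => rw [groupsB_nil]; simp
  | cons k rest =>
    rcases hp : runSplit (metricOf k) rest with ⟨run, tail⟩
    cases tail with
    | nil => rw [groupsB_cons_nil hp]; simp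
    | cons k2 t => rw [groupsB_cons_cons hp]; simp

theorem segs_ne_nil (m : String) (keys : List String) : segs m keys ≠ [] := by
  cases keys with
  | nil => simp [segs]
  | cons k rest => simp only [segs]; split <;> simp [groupsB_ne_nil]

theorem cons_group {k m : String} (rest : List String) (h : metricOf k = m) :
    groupsB (k :: rest) = (match segs m rest with
                           | [] => [[k]]
                           | g :: gs => (k :: g) :: gs) := by
  cases rest with
  | nil =>
    rw [groupsB_cons_nil (show runSplit (metricOf k) [] = ([], []) from rfl)]
    simp [segs]
  | cons r t =>
    by_cases hr : metricOf r = m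
    · have hrk : metricOf r = metricOf k := by rw [h, hr]
      have hs : segs m (r :: t) = groupsB (r :: t) := by
        simp only [segs]; rw [if_pos hr]
      rcases hp : runSplit (metricOf r) t with ⟨run, tail⟩
      have hp' : runSplit (metricOf k) (r :: t) = (r :: run, tail) := by
        rw [← hrk]
        simp [runSplit, hp]
      cases tail with
      | nil =>
        rw [groupsB_cons_nil hp', hs, groupsB_cons_nil hp]
      | cons k2 t2 =>
        rw [groupsB_cons_cons hp', hs, groupsB_cons_cons hp]
    · have hrk : ¬ metricOf r = metricOf k := by rw [h]; exact hr
      have hp' : runSplit (metricOf k) (r :: t) = ([], r :: t) := by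
        simp [runSplit, hrk]
      rw [groupsB_cons_cons hp']
      simp [segs, hr]

theorem stepA_some (d : PySem.Dict String String) (lines line : List String) (m key : String) :
    stepA d (lines, line, some m) key =
      if metricOf key = m then (lines, line ++ [fmtItem d key], some m)
      else (lines ++ [PySem.Str.join "\t" line], [fmtItem d key], some (metricOf key)) := by
  by_cases h : metricOf key = m <;> simp [stepA, h]

theorem stepA_none (d : PySem.Dict String String) (lines line : List String) (key : String) :
    stepA d (lines, line, none) key = (lines, line ++ [fmtItem d key], some (metricOf key)) := by
  simp [stepA]

-- render a pending partial line followed by the remaining groups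
def render (d : PySem.Dict String String) (line : List String) : List (List String) → List String
  | [] => []
  | g :: gs => PySem.Str.join "\t" (line ++ g.map (fmtItem d))
                 :: gs.map (fun g => PySem.Str.join "\t" (g.map (fmtItem d)))

-- A's loop from an arbitrary mid-run state produces exactly the rendering of segs
theorem mainA (d : PySem.Dict String String) :
    ∀ (keys lines line : List String) (m : String),
      (keys.foldl (stepA d) (lines, line, some m)).1
        ++ [PySem.Str.join "\t" (keys.foldl (stepA d) (lines, line, some m)).2.1]
      = lines ++ render d line (segs m keys) := by
  intro keys
  induction keys with
  | nil => intro lines line m; simp [segs, render]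
  | cons k rest ih =>
    intro lines line m
    rw [List.foldl_cons, stepA_some]
    by_cases h : metricOf k = m
    · rw [if_pos h, ih]
      congr 1
      have hs : segs m (k :: rest) = groupsB (k :: rest) := by simp [segs, h]
      rw [hs, cons_group rest h]
      rcases hseg : segs m rest with _ | ⟨g, gs⟩
      · exact absurd hseg (segs_ne_nil m rest)
      · simp [render]
    · rw [if_neg h, ih]
      have hs : segs m (k :: rest) = [] :: groupsB (k :: rest) := by simp [segs, h]
      rw [hs, cons_group rest rfl]
      rcases hseg : segs (metricOf k) rest with _ | ⟨g, gs⟩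
      · exact absurd hseg (segs_ne_nil (metricOf k) rest)
      · simp [render]

theorem ports_eq (d : PySem.Dict String String) (keys : List String) :
    PySem.Str.join "\n" ((keys.foldl (stepA d) ([], [], none)).1
        ++ [PySem.Str.join "\t" (keys.foldl (stepA d) ([], [], none)).2.1])
      = PySem.Str.join "\n" ((groupsB keys).map (fun g => PySem.Str.join "\t" (g.map (fmtItem d)))) := by
  cases keys with
  | nil => rw [groupsB_nil]; simp
  | cons k rest =>
    rw [List.foldl_cons, stepA_none, mainA, cons_group rest rfl]
    rcases hseg : segs (metricOf k) rest with _ | ⟨g, gs⟩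
    · exact absurd hseg (segs_ne_nil (metricOf k) rest)
    · simp [render]

-- ===== VERDICT (by name: the statement is the Claim_ definition above) =====
theorem format_rouge_scores_spec : Claim_equal_format_rouge_scores := by
  unfold Claim_equal_format_rouge_scores Spec_format_rouge_scores
  intro rouge_result _
  unfold format_rouge_scores format_rouge_scores_alt
  exact ports_eq _ _
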